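-- pv_equiv track=rewrite | github.com/sevenhe716/LeetCode | Array/q683_k_empty_slots.py | kEmptySlots1
-- ===== SOURCE A (Python) =====
-- import bisect
--
-- def kEmptySlots1(flowers, k):
--     active = []
--     # 末尾添加1，整合末尾的情况
--     for day, flower in enumerate(flowers, 1):
--         i = bisect.bisect(active, flower)
--         # 处理i=0的情况
--         for neighbor in active[i - (i > 0):i + 1]:
--             if abs(neighbor - flower) - 1 == k:
--                 return day
--         active.insert(i, flower)
--     return -1
-- ===== SOURCE B (Python) =====
-- def kEmptySlots1(flowers, k):
--     seen = []
--     for day, flower in enumerate(flowers, 1):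
--         lo = max((v for v in seen if v <= flower), default=None)
--         if lo is not None and flower - lo - 1 == k:
--             return day
--         hi = min((v for v in seen if v > flower), default=None)
--         if hi is not None and hi - flower - 1 == k:
--             return day
--         seen.append(flower)
--     return -1
-- ===== Notes on version B (the rewrite author's own statement) =====
-- stated objective: simpler
-- what changed: Instead of maintaining a bisect-sorted list and reading the inserted flower's slice neighbours, B keeps the unsorted prefix and computes the predecessor (max value <= flower) and successor (min value > flower) by direct scans, comparing each to the flower.
import Mathlib
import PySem

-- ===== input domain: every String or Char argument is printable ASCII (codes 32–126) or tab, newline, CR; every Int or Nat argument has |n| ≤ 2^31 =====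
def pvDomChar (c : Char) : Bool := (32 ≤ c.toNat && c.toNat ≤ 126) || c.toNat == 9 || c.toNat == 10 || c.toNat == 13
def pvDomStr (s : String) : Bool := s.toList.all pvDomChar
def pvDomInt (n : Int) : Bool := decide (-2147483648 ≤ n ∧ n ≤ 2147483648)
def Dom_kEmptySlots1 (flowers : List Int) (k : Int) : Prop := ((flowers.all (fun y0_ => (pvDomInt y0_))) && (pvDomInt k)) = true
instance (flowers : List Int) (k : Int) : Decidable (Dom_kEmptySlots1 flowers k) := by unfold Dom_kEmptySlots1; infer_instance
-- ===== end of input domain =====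

-- B replaces A's bisect-maintained sorted list and neighbour slice by direct
-- predecessor/successor scans over the unsorted prefix (objective: simpler).

-- ===== PORT A =====
-- loop over enumerate(flowers, 1) carrying the sorted list `active`
def kEmptySlots1Loop (k : Int) : List Int → Int → List Int → Int
  | _, _, [] => -1
  | active, day, flower :: rest =>
    let i := PySem.List.bisectRight active flower
    let nbrs := PySem.List.slice active (some ((i : Int) - (if 0 < i then 1 else 0))) (some ((i : Int) + 1))
    if nbrs.any (fun neighbor => |neighbor - flower| - 1 == k) then day
    else kEmptySlots1Loop k (PySem.List.insert active (i : Int) flower) (day + 1) rest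

def kEmptySlots1 (flowers : List Int) (k : Int) : Int :=
  kEmptySlots1Loop k [] 1 flowers

-- ===== PORT B =====
-- loop over enumerate(flowers, 1) carrying the unsorted prefix `seen`
def kEmptySlots1AltLoop (k : Int) : List Int → Int → List Int → Int
  | _, _, [] => -1
  | seen, day, flower :: rest =>
    let lo := PySem.List.max? (seen.filter (fun v => v ≤ flower)) (fun v => v)
    if (match lo with | some m => (flower - m - 1 == k) | none => false) then day
    else
      let hi := PySem.List.min? (seen.filter (fun v => flower < v)) (fun v => v)
      if (match hi with | some m => (m - flower - 1 == k) | none => false) then day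
      else kEmptySlots1AltLoop k (seen ++ [flower]) (day + 1) rest

def kEmptySlots1_alt (flowers : List Int) (k : Int) : Int :=
  kEmptySlots1AltLoop k [] 1 flowers

-- ===== PRECONDITION & SPEC =====
def Spec_kEmptySlots1 (flowers : List Int) (k : Int) (out : Int) : Prop := out = kEmptySlots1_alt flowers k
instance (flowers : List Int) (k : Int) (out : Int) : Decidable (Spec_kEmptySlots1 flowers k out) := by unfold Spec_kEmptySlots1; infer_instance

-- ===== CLAIM (what is proved, stated in full; the proofs are below) =====
def Claim_equal_kEmptySlots1 : Prop := ∀ (flowers : List Int) (k : Int), Dom_kEmptySlots1 flowers k → Spec_kEmptySlots1 flowers k (kEmptySlots1 flowers k)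


-- ===== LEMMAS AND PROOFS =====

-- PySem.List.insert at a nonnegative in-range index is take/cons/drop
theorem pv_insert_eq (xs : List Int) (i : Nat) (h : i ≤ xs.length) (v : Int) :
    PySem.List.insert xs (i : Int) v = xs.take i ++ v :: xs.drop i := by
  simp only [PySem.List.insert, PySem.List.sliceIndices]
  norm_num
  rw [min_eq_left (by exact_mod_cast h)]
  rw [if_neg (by omega)]
  simp

-- max?/min? with the identity key are invariant under permutation
theorem pv_max?_id_perm {l l' : List Int} (h : l.Perm l') :
    PySem.List.max? l (fun v => v) = PySem.List.max? l' (fun v => v) := by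
  cases hm : PySem.List.max? l (fun v => v) with
  | none =>
    rw [PySem.List.max?_eq_none_iff] at hm
    subst hm
    rw [List.nil_perm] at h; subst h; rfl
  | some m =>
    cases hm' : PySem.List.max? l' (fun v => v) with
    | none =>
      rw [PySem.List.max?_eq_none_iff] at hm'
      subst hm'
      rw [List.perm_nil] at h; subst h; simp [PySem.List.max?] at hm
    | some m' =>
      have h1 := PySem.List.max?_isMax hm' m (h.mem_iff.mp (PySem.List.max?_mem hm))
      have h2 := PySem.List.max?_isMax hm m' (h.mem_iff.mpr (PySem.List.max?_mem hm'))
      exact congrArg some (le_antisymm h1 h2)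

theorem pv_min?_id_perm {l l' : List Int} (h : l.Perm l') :
    PySem.List.min? l (fun v => v) = PySem.List.min? l' (fun v => v) := by
  cases hm : PySem.List.min? l (fun v => v) with
  | none =>
    rw [PySem.List.min?_eq_none_iff] at hm
    subst hm
    rw [List.nil_perm] at h; subst h; rfl
  | some m =>
    cases hm' : PySem.List.min? l' (fun v => v) with
    | none =>
      rw [PySem.List.min?_eq_none_iff] at hm'
      subst hm'
      rw [List.perm_nil] at h; subst h; simp [PySem.List.min?] at hm
    | some m' =>
      have h1 := PySem.List.min?_isMin hm' m (h.mem_iff.mp (PySem.List.min?_mem hm))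
      have h2 := PySem.List.min?_isMin hm m' (h.mem_iff.mpr (PySem.List.min?_mem hm'))
      exact congrArg some (le_antisymm h2 h1)

-- predecessor scan on a sorted list: empty iff bisectRight = 0, else the element left of the insertion point
theorem pv_lo_none (active : List Int) (f : Int) (hs : active.Pairwise (· ≤ ·))
    (hi : PySem.List.bisectRight active f = 0) :
    PySem.List.max? (active.filter (fun v => decide (v ≤ f))) (fun v => v) = none := by
  rw [PySem.List.max?_eq_none_iff]
  rw [List.filter_eq_nil_iff]
  intro a ha
  obtain ⟨j, hj, rfl⟩ := List.mem_iff_getElem.mp ha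
  have := (PySem.List.bisectRight_spec active f hs).2.2 j hj (by omega)
  simp only [decide_eq_true_eq]
  exact not_le.mpr this

theorem pv_lo_some (active : List Int) (f : Int) (hs : active.Pairwise (· ≤ ·))
    (hpos : 0 < PySem.List.bisectRight active f)
    (hlt : PySem.List.bisectRight active f - 1 < active.length) :
    PySem.List.max? (active.filter (fun v => decide (v ≤ f))) (fun v => v)
      = some (active[PySem.List.bisectRight active f - 1]) := by
  obtain ⟨hle, h2, h3⟩ := PySem.List.bisectRight_spec active f hs
  have hmem : active[PySem.List.bisectRight active f - 1] ∈ active.filter (fun v => decide (v ≤ f)) := by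
    rw [List.mem_filter]
    exact ⟨List.getElem_mem _, by simpa using h2 _ hlt (by omega)⟩
  cases hm : PySem.List.max? (active.filter (fun v => decide (v ≤ f))) (fun v => v) with
  | none =>
    rw [PySem.List.max?_eq_none_iff] at hm
    rw [hm] at hmem; simp at hmem
  | some m =>
    have hmax := PySem.List.max?_isMax hm _ hmem
    have hmm := PySem.List.max?_mem hm
    rw [List.mem_filter] at hmm
    obtain ⟨hma, hmf⟩ := hmm
    simp only [decide_eq_true_eq] at hmf
    obtain ⟨j, hj, hje⟩ := List.mem_iff_getElem.mp hma
    have hjlt : j < PySem.List.bisectRight active f := by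
      by_contra hc
      have := h3 j hj (by omega)
      omega
    have : active[j] ≤ active[PySem.List.bisectRight active f - 1] := by
      rcases Nat.lt_or_ge j (PySem.List.bisectRight active f - 1) with hl | hl
      · exact List.pairwise_iff_getElem.mp hs j _ hj hlt hl
      · have : j = PySem.List.bisectRight active f - 1 := by omega
        subst this; exact le_refl _
    rw [hje] at this
    exact congrArg some (le_antisymm this hmax)

-- successor scan on a sorted list: empty iff bisectRight = length, else the element at the insertion point
theorem pv_hi_none (active : List Int) (f : Int) (hs : active.Pairwise (· ≤ ·))
    (hi : PySem.List.bisectRight active f = active.length) :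
    PySem.List.min? (active.filter (fun v => decide (f < v))) (fun v => v) = none := by
  rw [PySem.List.min?_eq_none_iff]
  rw [List.filter_eq_nil_iff]
  intro a ha
  obtain ⟨j, hj, rfl⟩ := List.mem_iff_getElem.mp ha
  have := (PySem.List.bisectRight_spec active f hs).2.1 j hj (by omega)
  simp only [decide_eq_true_eq]
  exact not_lt.mpr this

theorem pv_hi_some (active : List Int) (f : Int) (hs : active.Pairwise (· ≤ ·))
    (hlt : PySem.List.bisectRight active f < active.length) :
    PySem.List.min? (active.filter (fun v => decide (f < v))) (fun v => v)
      = some (active[PySem.List.bisectRight active f]) := by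
  obtain ⟨hle, h2, h3⟩ := PySem.List.bisectRight_spec active f hs
  have hmem : active[PySem.List.bisectRight active f] ∈ active.filter (fun v => decide (f < v)) := by
    rw [List.mem_filter]
    exact ⟨List.getElem_mem _, by simpa using h3 _ hlt (le_refl _)⟩
  cases hm : PySem.List.min? (active.filter (fun v => decide (f < v))) (fun v => v) with
  | none =>
    rw [PySem.List.min?_eq_none_iff] at hm
    rw [hm] at hmem; simp at hmem
  | some m =>
    have hmin := PySem.List.min?_isMin hm _ hmem
    have hmm := PySem.List.min?_mem hm
    rw [List.mem_filter] at hmm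
    obtain ⟨hma, hmf⟩ := hmm
    simp only [decide_eq_true_eq] at hmf
    obtain ⟨j, hj, hje⟩ := List.mem_iff_getElem.mp hma
    have hjge : PySem.List.bisectRight active f ≤ j := by
      by_contra hc
      have := h2 j hj (by omega)
      omega
    have : active[PySem.List.bisectRight active f] ≤ active[j] := by
      rcases Nat.lt_or_ge (PySem.List.bisectRight active f) j with hl | hl
      · exact List.pairwise_iff_getElem.mp hs _ j hlt hj hl
      · have : PySem.List.bisectRight active f = j := by omega
        subst this; exact le_refl _
    rw [hje] at this
    exact congrArg some (le_antisymm hmin this)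

-- inserting at the bisectRight point keeps the list sorted
theorem pv_insert_sorted (active : List Int) (f : Int) (hs : active.Pairwise (· ≤ ·)) :
    (active.take (PySem.List.bisectRight active f) ++ f :: active.drop (PySem.List.bisectRight active f)).Pairwise (· ≤ ·) := by
  obtain ⟨hle, h2, h3⟩ := PySem.List.bisectRight_spec active f hs
  set i := PySem.List.bisectRight active f with hidef
  rw [List.pairwise_append]
  refine ⟨hs.sublist (List.take_sublist _ _), ?_, ?_⟩
  · rw [List.pairwise_cons]
    refine ⟨?_, hs.sublist (List.drop_sublist _ _)⟩
    intro b hb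
    obtain ⟨j, hj, rfl⟩ := List.mem_iff_getElem.mp hb
    rw [List.length_drop] at hj
    rw [List.getElem_drop]
    exact le_of_lt (h3 (i + j) (by omega) (by omega))
  · intro a ha b hb
    obtain ⟨j, hj, rfl⟩ := List.mem_iff_getElem.mp ha
    rw [List.length_take] at hj
    rw [List.getElem_take]
    have haf : active[j] ≤ f := h2 j (by omega) (by omega)
    rcases List.mem_cons.mp hb with rfl | hb'
    · exact haf
    · obtain ⟨j', hj', rfl⟩ := List.mem_iff_getElem.mp hb'
      rw [List.length_drop] at hj'
      rw [List.getElem_drop]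
      have := h3 (i + j') (by omega) (by omega)
      omega

-- unfolding lemmas for one loop step
theorem aLoop_cons (k f day : Int) (active rest : List Int) :
    kEmptySlots1Loop k active day (f :: rest) =
      (if (PySem.List.slice active
            (some ((PySem.List.bisectRight active f : Int) - (if 0 < PySem.List.bisectRight active f then 1 else 0)))
            (some ((PySem.List.bisectRight active f : Int) + 1))).any (fun neighbor => |neighbor - f| - 1 == k)
       then day
       else kEmptySlots1Loop k (PySem.List.insert active ((PySem.List.bisectRight active f : Nat) : Int) f) (day + 1) rest) := rfl

theorem bLoop_cons (k f day : Int) (seen rest : List Int) :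
    kEmptySlots1AltLoop k seen day (f :: rest) =
      (if (match PySem.List.max? (seen.filter (fun v => v ≤ f)) (fun v => v) with
            | some m => (f - m - 1 == k) | none => false)
       then day
       else if (match PySem.List.min? (seen.filter (fun v => f < v)) (fun v => v) with
            | some m => (m - f - 1 == k) | none => false)
       then day
       else kEmptySlots1AltLoop k (seen ++ [f]) (day + 1) rest) := rfl

-- one synchronized step + induction: the two loops agree
theorem main_loop_eq (k : Int) (rest : List Int) : ∀ (active seen : List Int) (day : Int),
    active.Pairwise (· ≤ ·) → active.Perm seen →
    kEmptySlots1Loop k active day rest = kEmptySlots1AltLoop k seen day rest := by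
  induction rest with
  | nil => intro active seen day _ _; rfl
  | cons f rest ih =>
    intro active seen day hs hp
    rw [aLoop_cons, bLoop_cons]
    obtain ⟨hle, h2, h3⟩ := PySem.List.bisectRight_spec active f hs
    have hLn := pv_lo_none active f hs
    have hLs := pv_lo_some active f hs
    have hHn := pv_hi_none active f hs
    have hHs := pv_hi_some active f hs
    have hSrt := pv_insert_sorted active f hs
    revert hle h2 h3 hLn hLs hHn hHs hSrt
    generalize PySem.List.bisectRight active f = i
    intro hle h2 h3 hLn hLs hHn hHs hSrt
    -- rewrite B's scans over `seen` as scans over `active`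
    have hlo : PySem.List.max? (seen.filter (fun v => decide (v ≤ f))) (fun v => v)
        = PySem.List.max? (active.filter (fun v => decide (v ≤ f))) (fun v => v) :=
      pv_max?_id_perm (hp.filter _).symm
    have hhi : PySem.List.min? (seen.filter (fun v => decide (f < v))) (fun v => v)
        = PySem.List.min? (active.filter (fun v => decide (f < v))) (fun v => v) :=
      pv_min?_id_perm (hp.filter _).symm
    have hrec : kEmptySlots1Loop k (PySem.List.insert active (i : Int) f) (day + 1) rest
        = kEmptySlots1AltLoop k (seen ++ [f]) (day + 1) rest := by
      rw [pv_insert_eq active i hle f]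
      refine ih _ _ _ hSrt ?_
      have p1 : (active.take i ++ f :: active.drop i).Perm (f :: active) := by
        have h := List.perm_middle (a := f) (l₁ := active.take i) (l₂ := active.drop i)
        rwa [List.take_append_drop] at h
      exact p1.trans ((hp.cons f).trans (List.perm_append_singleton f seen).symm)
    rw [hlo, hhi]
    rcases Nat.eq_zero_or_pos i with hi0 | hipos
    · -- insertion point at the front: no predecessor
      subst hi0
      have hslice : PySem.List.slice active (some ((0 : Int) - (if (0:Nat) < 0 then 1 else 0))) (some ((0 : Int) + 1))
          = active.take 1 := by
        rw [if_neg (by omega)]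
        rw [PySem.List.slice_toNat active (by norm_num) (by norm_num)]
        norm_num
      simp only [Nat.cast_zero]
      rw [hslice, hLn rfl]
      rcases Nat.eq_zero_or_pos active.length with hlen0 | h0lt
      · have hact : active = [] := List.length_eq_zero_iff.mp hlen0
        have hseen : seen = [] := List.Perm.eq_nil (hact ▸ hp).symm
        rw [hact, hseen] at hrec
        rw [hact, hseen]
        simp only [List.filter_nil, List.take_nil, List.any_nil]
        simpa [PySem.List.min?] using hrec
      · have hfa0 : f < active[0] := h3 0 h0lt (by omega)
        rw [hHs h0lt]
        have htake : active.take 1 = [active[0]] := by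
          have h := List.drop_eq_getElem_cons (i := 0) (l := active) h0lt
          rw [List.drop_zero] at h
          conv_lhs => rw [h]
          rfl
        rw [htake]
        simp only [List.any_cons, List.any_nil, Bool.or_false]
        rw [abs_of_pos (by omega)]
        by_cases hc : active[0] - f - 1 = k
        · simp [hc]
        · simpa [hc] using hrec
    · -- there is a predecessor active[i-1]
      have him1 : i - 1 < active.length := by omega
      have hslice : PySem.List.slice active (some ((i : Int) - (if 0 < i then 1 else 0))) (some ((i : Int) + 1))
          = (active.drop (i - 1)).take 2 := by
        rw [if_pos hipos]
        rw [show ((i:Int) - 1) = ((i - 1 : Nat) : Int) by omega]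
        rw [show ((i:Int) + 1) = ((i + 1 : Nat) : Int) by omega]
        rw [PySem.List.slice_toNat active (by omega) (by omega)]
        congr 1
        omega
      have hdrop : active.drop (i - 1) = active[i-1] :: active.drop i := by
        rw [List.drop_eq_getElem_cons him1]
        congr 2
        omega
      have hlef : active[i-1] ≤ f := h2 (i-1) him1 (by omega)
      have habs1 : |active[i-1] - f| = f - active[i-1] := by
        rw [abs_of_nonpos (by omega)]; ring
      rw [hslice, hdrop, hLs hipos him1]
      rcases Nat.lt_or_ge i active.length with hilt | hige
      · have hdrop2 : active.drop i = active[i] :: active.drop (i + 1) := List.drop_eq_getElem_cons hilt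
        have hfgt : f < active[i] := h3 i hilt (le_refl _)
        rw [hHs hilt, hdrop2]
        simp only [List.take_succ_cons, List.take_zero, List.any_cons, List.any_nil, Bool.or_false]
        rw [habs1, abs_of_pos (by omega)]
        by_cases hc1 : f - active[i-1] - 1 = k
        · simp [hc1]
        · by_cases hc2 : active[i] - f - 1 = k
          · simp [hc1, hc2]
          · simpa [hc1, hc2] using hrec
      · have hieq : i = active.length := by omega
        have hdropnil : active.drop i = [] := by rw [List.drop_eq_nil_iff]; omega
        rw [hHn hieq, hdropnil]
        simp only [List.take_succ_cons, List.take_nil, List.any_cons, List.any_nil, Bool.or_false]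
        rw [habs1]
        by_cases hc1 : f - active[i-1] - 1 = k
        · simp [hc1]
        · simpa [hc1] using hrec

-- ===== VERDICT (by name: the statement is the Claim_ definition above) =====
theorem kEmptySlots1_spec : Claim_equal_kEmptySlots1 := by
  intro flowers k _
  unfold Spec_kEmptySlots1 kEmptySlots1 kEmptySlots1_alt
  exact main_loop_eq k flowers [] [] 1 (by simp) (List.Perm.refl _)
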